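-- pv_equiv track=rewrite | github.com/ysknsid25/atcoder | src/2025/ABc409-C.py | count_equilateral_triangles
-- ===== SOURCE A (Python) =====
-- import collections
--
-- def count_equilateral_triangles(N, L, distances):
--     if N < 3:
--         return 0
--
--     # 点の位置を計算
--     # N=0 の場合: positions = []
--     # N=1 の場合: positions = [0]
--     # N>1 の場合: positions[0]=0, 残りはループで計算
--     positions = [0] * N
--     for i in range(1, N): # N=0, N=1 のときは実行されない
--         positions[i] = (positions[i - 1] + distances[i - 1]) % L
--
--     # 正三角形を形成するためには、円周 L が3で割り切れる必要がある
--     if L % 3 != 0: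
--         return 0
--
--     side_len = L // 3
--
--     # L が3の倍数であり、問題の制約から通常 L>=3 が期待されるため side_len >= 1。
--     # side_len = 0 (L=0 の場合など) は辺長0の正三角形となり、ここでは0個とする。
--     if side_len == 0:
--         return 0
--
--     # 各位置に存在する点の数をカウント
--     position_counts = collections.Counter(positions)
--
--     count = 0
--     # 各位置 p1 を起点として正三角形 (p1, p2_target, p3_target) を探す
--     # side_len >= 1 のため、p1, p2_target, p3_target は必ず異なる3つの位置になる
--     for p1 in position_counts:
--         p2_target = (p1 + side_len) % L
--         p3_target = (p1 + 2 * side_len) % L # または (p2_target + side_len) % L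
--
--         # p1, p2_target, p3_target の位置に点が存在する場合、その組み合わせをカウント
--         # Counter は存在しないキーに対して 0 を返すので、直接積を計算しても安全
--         if p2_target in position_counts and p3_target in position_counts:
--             count += position_counts[p1] * position_counts[p2_target] * position_counts[p3_target]
--
--     # 各正三角形は、3つの頂点のどれを p1 としたかによって3回カウントされる。
--     # (例: 三角形 {A, B, C} は、p1=A, p1=B, p1=C の3回カウントされる)
--     # side_len > 0 なので、A, B, C は必ず異なる位置。
--     return count // 3
-- ===== SOURCE B (Python) =====
-- def count_equilateral_triangles(N, L, distances):
--     if N < 3: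
--         return 0
--     if L % 3 != 0:
--         return 0
--     side = L // 3
--
--     if side == 0:
--         return 0
--
--     # Single fused pass: walk the prefix sums and bucket every point directly by its
--     # residue class modulo side; buckets[r] = [#points at r, #points at r+side, #points at r+2*side].
--     # The three positions of one residue class are exactly the vertices of one candidate
--     # equilateral triangle, so no Counter over positions and no final //3 are needed.
--     buckets = {}
--     pos = 0
--     b = buckets.setdefault(pos % side, [0, 0, 0])
--     b[pos // side] += 1
--     for d in distances[:N - 1]:
--         pos = (pos + d) % L
--         b = buckets.setdefault(pos % side, [0, 0, 0])
--         b[pos // side] += 1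
--
--     total = 0
--     for c0, c1, c2 in buckets.values():
--         total += c0 * c1 * c2
--     return total
-- ===== Notes on version B (the rewrite author's own statement) =====
-- stated objective: alternative
-- what changed: B drops A's staged pipeline (positions list, Counter of positions, guarded loop over distinct positions, final //3): in one fused pass it walks the prefix sums and buckets each point by its residue class modulo side_len into a dict residue -> [count at r, count at r+side, count at r+2*side], then sums one product per bucket, so no Counter, no membership tests and no triple-overcount correction exist.
import Mathlib
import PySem

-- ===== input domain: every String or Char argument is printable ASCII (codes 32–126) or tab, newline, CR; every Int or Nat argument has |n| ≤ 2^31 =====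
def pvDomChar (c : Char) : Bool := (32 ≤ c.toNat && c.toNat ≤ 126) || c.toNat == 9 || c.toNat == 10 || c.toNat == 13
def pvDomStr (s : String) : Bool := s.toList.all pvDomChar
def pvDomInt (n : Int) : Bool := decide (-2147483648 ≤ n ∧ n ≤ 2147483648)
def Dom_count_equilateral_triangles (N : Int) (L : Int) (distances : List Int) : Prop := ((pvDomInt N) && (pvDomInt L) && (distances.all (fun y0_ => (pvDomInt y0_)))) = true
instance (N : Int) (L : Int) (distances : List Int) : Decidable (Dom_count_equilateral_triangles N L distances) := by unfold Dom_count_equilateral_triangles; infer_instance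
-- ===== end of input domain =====

-- B replaces A's staged pipeline (positions list, Counter, guarded loop over distinct
-- positions, final //3) by one fused pass that buckets each prefix-sum point by its
-- residue class modulo side_len into residue -> [c0, c1, c2] and sums one product per
-- bucket; objective: alternative (same O(N) cost, different algorithmic decomposition).

-- ===== PORT A =====
-- A's positions loop 'positions[i] = (positions[i-1] + distances[i-1]) % L'
def pvPositions (L : Int) (prev : Int) : List Int → List Int
  | [] => []
  | d :: rest => PySem.Int.mod (prev + d) L :: pvPositions L (PySem.Int.mod (prev + d) L) rest

-- A's counting loop: for each distinct position p1, the guarded triple product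
def pvTriplesA (L : Int) (side_len : Int) (ps : List Int) : Int :=
  (PySem.Dict.counter ps).keys.foldl (fun c p1 =>
    if (PySem.Dict.counter ps).contains (PySem.Int.mod (p1 + side_len) L) &&
       (PySem.Dict.counter ps).contains (PySem.Int.mod (p1 + 2 * side_len) L) then
      c + (PySem.Dict.counter ps).getD p1 0 *
          (PySem.Dict.counter ps).getD (PySem.Int.mod (p1 + side_len) L) 0 *
          (PySem.Dict.counter ps).getD (PySem.Int.mod (p1 + 2 * side_len) L) 0
    else c) 0

def count_equilateral_triangles (N : Int) (L : Int) (distances : List Int) : Int :=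
  if N < 3 then 0
  else if PySem.Int.mod L 3 ≠ 0 then 0
  else if PySem.Int.floordiv L 3 = 0 then 0
  else
    PySem.Int.floordiv
      (pvTriplesA L (PySem.Int.floordiv L 3)
        (0 :: pvPositions L 0 (distances.take (N - 1).toNat))) 3

-- ===== PORT B =====
-- b[pos // side] += 1 on the bucket b
def pvInc3 (s p : Int) (b : List Int) : List Int :=
  PySem.List.pySetD b (PySem.Int.floordiv p s)
    (PySem.List.pyGetD b (PySem.Int.floordiv p s) 0 + 1)

-- buckets.setdefault(pos % side, [0, 0, 0])[pos // side] += 1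
def pvBump (s : Int) (d : PySem.Dict Int (List Int)) (p : Int) : PySem.Dict Int (List Int) :=
  d.modify (PySem.Int.mod p s) [0, 0, 0] (pvInc3 s p)

-- B's fused loop: 'for d in distances[:N-1]: pos = (pos + d) % L; <bump>'
def pvLoopB (L s : Int) (d : PySem.Dict Int (List Int)) (pos : Int) :
    List Int → PySem.Dict Int (List Int)
  | [] => d
  | dist :: rest =>
      pvLoopB L s (pvBump s d (PySem.Int.mod (pos + dist) L)) (PySem.Int.mod (pos + dist) L) rest

-- 'for c0, c1, c2 in buckets.values(): total += c0 * c1 * c2' (every bucket has 3 entries)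
def pvProd3 : List Int → Int
  | [c0, c1, c2] => c0 * c1 * c2
  | _ => 0

def count_equilateral_triangles_alt (N : Int) (L : Int) (distances : List Int) : Int :=
  if N < 3 then 0
  else if PySem.Int.mod L 3 ≠ 0 then 0
  else if PySem.Int.floordiv L 3 = 0 then 0
  else
    ((pvLoopB L (PySem.Int.floordiv L 3)
        (pvBump (PySem.Int.floordiv L 3) PySem.Dict.empty 0) 0
        (PySem.List.slice distances none (some (N - 1)))).values).foldl
      (fun t v => t + pvProd3 v) 0

-- ===== PRECONDITION & SPEC =====
-- Pre_ excludes only inputs where Python A raises: L = 0 (ZeroDivisionError in '% L') or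
-- fewer than N-1 distances (IndexError), both reached only when N >= 3.
def Pre_count_equilateral_triangles (N : Int) (L : Int) (distances : List Int) : Prop :=
  N < 3 ∨ (L ≠ 0 ∧ N - 1 ≤ (distances.length : Int))
instance (N : Int) (L : Int) (distances : List Int) : Decidable (Pre_count_equilateral_triangles N L distances) := by unfold Pre_count_equilateral_triangles; infer_instance

def pvWitness_count_equilateral_triangles : Int × Int × List Int := (3, 3, [1, 1])

def Spec_count_equilateral_triangles (N : Int) (L : Int) (distances : List Int) (out : Int) : Prop := out = count_equilateral_triangles_alt N L distances
instance (N : Int) (L : Int) (distances : List Int) (out : Int) : Decidable (Spec_count_equilateral_triangles N L distances out) := by unfold Spec_count_equilateral_triangles; infer_instance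

-- ===== CLAIM (what is proved, stated in full; the proofs are below) =====
def Claim_equal_count_equilateral_triangles : Prop := ∀ (N : Int) (L : Int) (distances : List Int), Dom_count_equilateral_triangles N L distances → Pre_count_equilateral_triangles N L distances → Spec_count_equilateral_triangles N L distances (count_equilateral_triangles N L distances)

-- ===== LEMMAS AND PROOFS =====

-- the common reference value both counting loops are reduced to:
-- one product of multiplicities per distinct residue class modulo s
def pvSumCounts (s : Int) (ps : List Int) : Int :=
  ((PySem.Set.ofList (ps.map (fun p => PySem.Int.mod p s))).map
    (fun r => (ps.count r : Int) * (ps.count (r + s) : Int) * (ps.count (r + 2 * s) : Int))).sum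

-- uniqueness of the Python-mod representative: if a = b*k + r with r in the mod-b range, a % b = r
lemma pvModEq (b k r : Int)
    (hr : (0 < b ∧ 0 ≤ r ∧ r < b) ∨ (b < 0 ∧ b < r ∧ r ≤ 0)) :
    PySem.Int.mod (b * k + r) b = r := by
  have h1 := PySem.Int.floordiv_mul_add_mod (b * k + r) b
  set q := PySem.Int.floordiv (b * k + r) b with hq
  set m := PySem.Int.mod (b * k + r) b with hm
  have hmb : (0 < b ∧ 0 ≤ m ∧ m < b) ∨ (b < 0 ∧ b < m ∧ m ≤ 0) := by
    rcases hr with ⟨h, _⟩ | ⟨h, _⟩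
    · exact Or.inl ⟨h, PySem.Int.mod_nonneg _ h, PySem.Int.mod_lt _ h⟩
    · exact Or.inr ⟨h, (PySem.Int.mod_neg_bounds _ h).1, (PySem.Int.mod_neg_bounds _ h).2⟩
  have hdvd : |b| ∣ (r - m) := (abs_dvd _ _).mpr ⟨q - k, by linarith [h1, mul_sub b q k, mul_comm q b]⟩
  have habs : |r - m| < |b| := by
    rcases hr with ⟨h, hr1, hr2⟩ | ⟨h, hr1, hr2⟩ <;> rcases hmb with ⟨h', hm1, hm2⟩ | ⟨h', hm1, hm2⟩
    · rw [abs_of_pos h, abs_lt]; omega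
    · omega
    · omega
    · rw [abs_of_neg h, abs_lt]; omega
  have := Int.eq_zero_of_abs_lt_dvd hdvd habs
  omega

lemma pvModIdem (a b : Int) : PySem.Int.mod (PySem.Int.mod a b) b = PySem.Int.mod a b := by
  by_cases hb : b = 0
  · subst hb; simp [PySem.Int.mod]
  · rcases lt_or_gt_of_ne hb with h | h
    · have hbnd := PySem.Int.mod_neg_bounds a h
      have := pvModEq b 0 (PySem.Int.mod a b) (Or.inr ⟨h, hbnd.1, hbnd.2⟩)
      simpa using this
    · have := pvModEq b 0 (PySem.Int.mod a b)
        (Or.inl ⟨h, PySem.Int.mod_nonneg a h, PySem.Int.mod_lt a h⟩)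
      simpa using this

lemma pvPositions_mod (L : Int) (ds : List Int) (prev : Int) :
    ∀ p ∈ pvPositions L prev ds, PySem.Int.mod p L = p := by
  induction ds generalizing prev with
  | nil => simp [pvPositions]
  | cons d rest ih =>
      intro p hp
      simp only [pvPositions, List.mem_cons] at hp
      rcases hp with rfl | hp
      · exact pvModIdem _ _
      · exact ih _ p hp

lemma pvResBounds (s p : Int) (hs : s ≠ 0) :
    (0 < s ∧ 0 ≤ PySem.Int.mod p s ∧ PySem.Int.mod p s < s) ∨
    (s < 0 ∧ s < PySem.Int.mod p s ∧ PySem.Int.mod p s ≤ 0) := by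
  rcases lt_or_gt_of_ne hs with h | h
  · exact Or.inr ⟨h, (PySem.Int.mod_neg_bounds p h).1, (PySem.Int.mod_neg_bounds p h).2⟩
  · exact Or.inl ⟨h, PySem.Int.mod_nonneg p h, PySem.Int.mod_lt p h⟩

-- mod values across one residue class {r, r+s, r+2s}
lemma pvClassMod (s r : Int)
    (hrb : (0 < s ∧ 0 ≤ r ∧ r < s) ∨ (s < 0 ∧ s < r ∧ r ≤ 0)) :
    PySem.Int.mod r (3 * s) = r ∧
    PySem.Int.mod (r + s) (3 * s) = r + s ∧
    PySem.Int.mod (r + 2 * s) (3 * s) = r + 2 * s ∧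
    PySem.Int.mod (r + 3 * s) (3 * s) = r ∧
    PySem.Int.mod (r + 4 * s) (3 * s) = r + s ∧
    PySem.Int.mod r s = r ∧
    PySem.Int.mod (r + s) s = r ∧
    PySem.Int.mod (r + 2 * s) s = r := by
  have hb : ∀ x : Int, ((0 < s ∧ 0 ≤ x ∧ x < 3 * s) ∨ (s < 0 ∧ 3 * s < x ∧ x ≤ 0)) →
      ((0 < 3 * s ∧ 0 ≤ x ∧ x < 3 * s) ∨ (3 * s < 0 ∧ 3 * s < x ∧ x ≤ 0)) := by
    intro x hx; omega
  refine ⟨?_, ?_, ?_, ?_, ?_, ?_, ?_, ?_⟩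
  · have := pvModEq (3 * s) 0 r (hb r (by omega)); simpa using this
  · have := pvModEq (3 * s) 0 (r + s) (hb (r + s) (by omega)); simpa using this
  · have := pvModEq (3 * s) 0 (r + 2 * s) (hb (r + 2 * s) (by omega)); simpa using this
  · have := pvModEq (3 * s) 1 r (hb r (by omega))
    rw [show (3 * s) * 1 + r = r + 3 * s by ring] at this; exact this
  · have := pvModEq (3 * s) 1 (r + s) (hb (r + s) (by omega))
    rw [show (3 * s) * 1 + (r + s) = r + 4 * s by ring] at this; exact this
  · have := pvModEq s 0 r hrb; simpa using this
  · have := pvModEq s 1 r hrb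
    rw [show s * 1 + r = r + s by ring] at this; exact this
  · have := pvModEq s 2 r hrb
    rw [show s * 2 + r = r + 2 * s by ring] at this; exact this

-- any p fixed by % (3s) is its residue plus 0, 1 or 2 sides
lemma pvDecomp (s p : Int) (hs : s ≠ 0) (hp : PySem.Int.mod p (3 * s) = p) :
    p = PySem.Int.mod p s ∨ p = PySem.Int.mod p s + s ∨ p = PySem.Int.mod p s + 2 * s := by
  have h1 := PySem.Int.floordiv_mul_add_mod p s
  set q := PySem.Int.floordiv p s with hqd
  set r := PySem.Int.mod p s with hrd
  have hrb := pvResBounds s p hs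
  have hpb : (0 < s ∧ 0 ≤ p ∧ p < 3 * s) ∨ (s < 0 ∧ 3 * s < p ∧ p ≤ 0) := by
    rcases lt_or_gt_of_ne hs with h | h
    · have h3 : (3 : Int) * s < 0 := by omega
      have := PySem.Int.mod_neg_bounds p h3
      exact Or.inr ⟨h, by omega, by omega⟩
    · have h3 : (0 : Int) < 3 * s := by omega
      have h4 := PySem.Int.mod_nonneg p h3
      have h5 := PySem.Int.mod_lt p h3
      exact Or.inl ⟨h, by omega, by omega⟩
  have hq : q = 0 ∨ q = 1 ∨ q = 2 := by
    rcases hpb with ⟨h, hp1, hp2⟩ | ⟨h, hp1, hp2⟩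
    · rcases hrb with ⟨_, hr1, hr2⟩ | ⟨h', _, _⟩
      · have hlt : q * s < 3 * s := by omega
        have hgt : (-1) * s < q * s := by omega
        have c1 : q < 3 := by
          by_contra hc; push Not at hc
          have := mul_le_mul_of_nonneg_right hc (le_of_lt h); omega
        have c2 : -1 < q := by
          by_contra hc; push Not at hc
          have := mul_le_mul_of_nonneg_right hc (le_of_lt h); omega
        omega
      · omega
    · rcases hrb with ⟨h', _, _⟩ | ⟨_, hr1, hr2⟩
      · omega
      · have hlt : q * s < (-1) * s := by omega
        have hgt : 3 * s < q * s := by omega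
        have c1 : q < 3 := by
          by_contra hc; push Not at hc
          have := mul_le_mul_of_nonpos_right hc (le_of_lt h); omega
        have c2 : -1 < q := by
          by_contra hc; push Not at hc
          have := mul_le_mul_of_nonpos_right hc (le_of_lt h); omega
        omega
  rcases hq with h | h | h
  · left; rw [h, zero_mul] at h1; omega
  · right; left; rw [h, one_mul] at h1; omega
  · right; right; rw [h] at h1; omega

-- the quotient p // s of a point fixed by % (3s) is 0, 1 or 2
lemma pvKBound (s p : Int) (hs : s ≠ 0) (hp : PySem.Int.mod p (3 * s) = p) :
    PySem.Int.floordiv p s = 0 ∨ PySem.Int.floordiv p s = 1 ∨ PySem.Int.floordiv p s = 2 := by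
  have h1 := PySem.Int.floordiv_mul_add_mod p s
  rcases pvDecomp s p hs hp with h | h | h
  · left
    have : PySem.Int.floordiv p s * s = 0 * s := by omega
    exact mul_right_cancel₀ hs this
  · right; left
    have : PySem.Int.floordiv p s * s = 1 * s := by omega
    exact mul_right_cancel₀ hs this
  · right; right
    have : PySem.Int.floordiv p s * s = 2 * s := by omega
    exact mul_right_cancel₀ hs this

-- B's fused loop IS the bump-fold over the position list A materialises
lemma pvLoopB_eq_foldl (L s : Int) (ds : List Int) (d : PySem.Dict Int (List Int)) (pos : Int) :
    pvLoopB L s d pos ds = (pvPositions L pos ds).foldl (pvBump s) d := by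
  induction ds generalizing d pos with
  | nil => rfl
  | cons dist rest ih => simp [pvLoopB, pvPositions, ih]

-- lookup after the bump-fold: only the bumps whose residue is r act on bucket r
lemma pvGetD_foldl_bump (s : Int) (l : List Int) (d : PySem.Dict Int (List Int)) (r : Int) :
    (l.foldl (pvBump s) d).getD r [0, 0, 0]
      = (l.filter (fun p => PySem.Int.mod p s == r)).foldl (fun b p => pvInc3 s p b)
          (d.getD r [0, 0, 0]) := by
  induction l generalizing d with
  | nil => rfl
  | cons p l ih =>
      by_cases h : PySem.Int.mod p s = r
      · have hf : (p :: l).filter (fun p => PySem.Int.mod p s == r)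
            = p :: l.filter (fun p => PySem.Int.mod p s == r) := by simp [h]
        rw [List.foldl_cons, hf, List.foldl_cons, ih]
        congr 1
        simp only [pvBump, h]
        exact PySem.Dict.getD_modify_self d r [0, 0, 0] (pvInc3 s p)
      · have hf : (p :: l).filter (fun p => PySem.Int.mod p s == r)
            = l.filter (fun p => PySem.Int.mod p s == r) := by simp [h]
        rw [List.foldl_cons, hf, ih]
        congr 1
        simp only [pvBump]
        exact PySem.Dict.getD_modify_of_ne d [0, 0, 0] (pvInc3 s p) (Ne.symm h)

-- bumping one slot of a literal three-slot bucket
lemma pvInc3_zero (s p a0 a1 a2 : Int) (h : PySem.Int.floordiv p s = 0) :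
    pvInc3 s p [a0, a1, a2] = [a0 + 1, a1, a2] := by
  simp [pvInc3, h, PySem.List.pySetD, PySem.List.pySet?, PySem.List.pyGetD,
    PySem.List.pyGet?, PySem.List.pyIdx?]

lemma pvInc3_one (s p a0 a1 a2 : Int) (h : PySem.Int.floordiv p s = 1) :
    pvInc3 s p [a0, a1, a2] = [a0, a1 + 1, a2] := by
  simp [pvInc3, h, PySem.List.pySetD, PySem.List.pySet?, PySem.List.pyGetD,
    PySem.List.pyGet?, PySem.List.pyIdx?]

lemma pvInc3_two (s p a0 a1 a2 : Int) (h : PySem.Int.floordiv p s = 2) :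
    pvInc3 s p [a0, a1, a2] = [a0, a1, a2 + 1] := by
  simp [pvInc3, h, PySem.List.pySetD, PySem.List.pySet?, PySem.List.pyGetD,
    PySem.List.pyGet?, PySem.List.pyIdx?]

-- folding the bumps of one residue class over an [a0,a1,a2] bucket adds the per-slot counts
lemma pvFoldInc3 (s : Int) (q : List Int) (a0 a1 a2 : Int)
    (hq : ∀ p ∈ q, PySem.Int.floordiv p s = 0 ∨ PySem.Int.floordiv p s = 1 ∨ PySem.Int.floordiv p s = 2) :
    q.foldl (fun b p => pvInc3 s p b) [a0, a1, a2]
      = [a0 + (q.countP (fun p => PySem.Int.floordiv p s == 0) : Int),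
         a1 + (q.countP (fun p => PySem.Int.floordiv p s == 1) : Int),
         a2 + (q.countP (fun p => PySem.Int.floordiv p s == 2) : Int)] := by
  induction q generalizing a0 a1 a2 with
  | nil => simp
  | cons p q ih =>
      have hp := hq p List.mem_cons_self
      have hq2 : ∀ x ∈ q, PySem.Int.floordiv x s = 0 ∨ PySem.Int.floordiv x s = 1 ∨ PySem.Int.floordiv x s = 2 :=
        fun x hx => hq x (List.mem_cons_of_mem _ hx)
      rw [List.foldl_cons]
      rcases hp with h | h | h
      · rw [pvInc3_zero s p a0 a1 a2 h, ih _ _ _ hq2]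
        simp only [List.countP_cons, h]
        simp only [List.cons.injEq, and_true]
        refine ⟨by push_cast; simp; ring, by simp, by simp⟩
      · rw [pvInc3_one s p a0 a1 a2 h, ih _ _ _ hq2]
        simp only [List.countP_cons, h]
        simp only [List.cons.injEq, and_true]
        refine ⟨by simp, by push_cast; simp; ring, by simp⟩
      · rw [pvInc3_two s p a0 a1 a2 h, ih _ _ _ hq2]
        simp only [List.countP_cons, h]
        simp only [List.cons.injEq, and_true]
        refine ⟨by simp, by simp, by push_cast; simp; ring⟩

-- counting 'residue r, slot k' in ps is counting the single position r + k*s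
lemma pvFilterCount (s r : Int) (ps : List Int) (hs : s ≠ 0)
    (hrb : (0 < s ∧ 0 ≤ r ∧ r < s) ∨ (s < 0 ∧ s < r ∧ r ≤ 0))
    (k : Int) (hk : k = 0 ∨ k = 1 ∨ k = 2) :
    (ps.filter (fun p => PySem.Int.mod p s == r)).countP
        (fun p => PySem.Int.floordiv p s == k)
      = ps.count (r + k * s) := by
  obtain ⟨_, _, _, _, _, n0, n1, n2⟩ := pvClassMod s r hrb
  rw [List.countP_filter, List.count_eq_countP]
  apply List.countP_congr
  intro p _
  have h1 := PySem.Int.floordiv_mul_add_mod p s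
  have hkm : PySem.Int.mod (r + k * s) s = r := by
    rcases hk with rfl | rfl | rfl
    · simpa using n0
    · simpa using n1
    · simpa [two_mul] using n2
  constructor
  · intro h
    simp only [Bool.and_eq_true, beq_iff_eq] at h
    obtain ⟨hdiv, hmod⟩ := h
    simp only [beq_iff_eq]
    rw [hdiv, hmod] at h1
    omega
  · intro h
    simp only [beq_iff_eq] at h
    subst h
    simp only [Bool.and_eq_true, beq_iff_eq]
    refine ⟨?_, hkm⟩
    have h2 := PySem.Int.floordiv_mul_add_mod (r + k * s) s
    rw [hkm] at h2
    have : PySem.Int.floordiv (r + k * s) s * s = k * s := by omega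
    exact mul_right_cancel₀ hs this

-- B's bucket dict, summed bucket-by-bucket, is the per-residue-class reference sum
lemma pvAltVal (L s : Int) (hs : s ≠ 0) (hL : L = 3 * s) (ps : List Int)
    (hmem : ∀ p ∈ ps, PySem.Int.mod p L = p) :
    ((ps.foldl (pvBump s) PySem.Dict.empty).values).foldl (fun t v => t + pvProd3 v) 0
      = pvSumCounts s ps := by
  subst hL
  set D := ps.foldl (pvBump s) PySem.Dict.empty with hD
  have hkeys : D.keys = PySem.Set.ofList (ps.map (fun p => PySem.Int.mod p s)) := by
    have := PySem.Dict.keys_foldl_modify_key (l := ps)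
      (key := fun p => PySem.Int.mod p s) (d0 := ([0,0,0] : List Int))
      (f := fun _ p => pvInc3 s p) (d := PySem.Dict.empty)
    simpa [pvBump, PySem.Set.update_nil_left] using this
  have hnd : D.keys.Nodup := by
    have := PySem.Dict.nodup_keys_foldl_modify_key (l := ps)
      (key := fun p => PySem.Int.mod p s) (d0 := ([0,0,0] : List Int))
      (f := fun _ p => pvInc3 s p) (d := PySem.Dict.empty)
      (h := PySem.Dict.nodup_keys_empty)
    simpa [pvBump] using this
  rw [PySem.List.foldl_add (g := pvProd3), zero_add,
      PySem.Dict.values_eq_map_keys D hnd ([0,0,0] : List Int), List.map_map]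
  unfold pvSumCounts
  rw [← hkeys]
  apply congrArg
  apply List.map_congr_left
  intro r hr
  have hrmem : r ∈ ps.map (fun p => PySem.Int.mod p s) := by
    rw [hkeys] at hr
    exact (PySem.Set.mem_ofList _ _).mp hr
  obtain ⟨p0, hp0, hfp0⟩ := List.mem_map.mp hrmem
  have hrb : (0 < s ∧ 0 ≤ r ∧ r < s) ∨ (s < 0 ∧ s < r ∧ r ≤ 0) := by
    have := pvResBounds s p0 hs
    rw [hfp0] at this
    exact this
  have hgetD : D.getD r [0,0,0]
      = [((ps.count r : Nat) : Int), ((ps.count (r + s) : Nat) : Int),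
         ((ps.count (r + 2 * s) : Nat) : Int)] := by
    rw [hD, pvGetD_foldl_bump, PySem.Dict.getD_empty]
    have hq : ∀ p ∈ ps.filter (fun p => PySem.Int.mod p s == r),
        PySem.Int.floordiv p s = 0 ∨ PySem.Int.floordiv p s = 1 ∨ PySem.Int.floordiv p s = 2 := by
      intro p hp
      exact pvKBound s p hs (hmem p (List.mem_of_mem_filter hp))
    rw [pvFoldInc3 s _ 0 0 0 hq]
    rw [pvFilterCount s r ps hs hrb 0 (Or.inl rfl),
        pvFilterCount s r ps hs hrb 1 (Or.inr (Or.inl rfl)),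
        pvFilterCount s r ps hs hrb 2 (Or.inr (Or.inr rfl))]
    norm_num
  simp only [Function.comp, hgetD, pvProd3]

-- the key counting identity: A's guarded triple-counting sum over distinct positions is
-- exactly three times the per-residue-class reference sum
lemma pvKey (L s : Int) (hs : s ≠ 0) (hL : L = 3 * s) (ps : List Int)
    (hmem : ∀ p ∈ ps, PySem.Int.mod p L = p) :
    pvTriplesA L s ps = 3 * pvSumCounts s ps := by
  subst hL
  unfold pvTriplesA pvSumCounts
  set C := PySem.Dict.counter (κ := Int) ps with hC
  have hget : ∀ x : Int, C.getD x 0 = (ps.count x : Int) := fun x => PySem.Dict.getD_counter ps x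
  have hzero : ∀ x : Int, x ∉ ps → (ps.count x : Int) = 0 := by
    intro x hx; rw [List.count_eq_zero.mpr hx]; rfl
  have hmemne : ∀ x : Int, (ps.count x : Int) ≠ 0 → x ∈ ps := by
    intro x hx; by_contra hc; exact hx (hzero x hc)
  -- drop A's guard: a false guard means a zero factor
  have hfun : (fun (c p1 : Int) =>
      if C.contains (PySem.Int.mod (p1 + s) (3 * s)) &&
         C.contains (PySem.Int.mod (p1 + 2 * s) (3 * s)) then
        c + C.getD p1 0 * C.getD (PySem.Int.mod (p1 + s) (3 * s)) 0 *
            C.getD (PySem.Int.mod (p1 + 2 * s) (3 * s)) 0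
      else c)
      = fun (c p1 : Int) => c + (ps.count p1 : Int) * (ps.count (PySem.Int.mod (p1 + s) (3 * s)) : Int) *
            (ps.count (PySem.Int.mod (p1 + 2 * s) (3 * s)) : Int) := by
    funext c p1
    rw [hget, hget, hget]
    split_ifs with hg
    · rfl
    · have hg' : C.contains (PySem.Int.mod (p1 + s) (3 * s)) = false ∨
          C.contains (PySem.Int.mod (p1 + 2 * s) (3 * s)) = false := by
        cases ha : C.contains (PySem.Int.mod (p1 + s) (3 * s)) <;>
          cases hb : C.contains (PySem.Int.mod (p1 + 2 * s) (3 * s)) <;> simp_all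
      rcases hg' with hf | hf
      · have hnm : PySem.Int.mod (p1 + s) (3 * s) ∉ ps := by
          intro hmem'
          rw [hC, PySem.Dict.contains_counter] at hf
          simp [List.contains_eq_mem, hmem'] at hf
        rw [hzero _ hnm]; ring
      · have hnm : PySem.Int.mod (p1 + 2 * s) (3 * s) ∉ ps := by
          intro hmem'
          rw [hC, PySem.Dict.contains_counter] at hf
          simp [List.contains_eq_mem, hmem'] at hf
        rw [hzero _ hnm]; ring
  rw [hfun, PySem.List.foldl_add, zero_add]
  -- termwise, A's summand at a key p equals the reference summand at p's residue class
  have hterm : ∀ p ∈ C.keys,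
      (ps.count p : Int) * (ps.count (PySem.Int.mod (p + s) (3 * s)) : Int) *
        (ps.count (PySem.Int.mod (p + 2 * s) (3 * s)) : Int)
      = (ps.count (PySem.Int.mod p s) : Int) * (ps.count (PySem.Int.mod p s + s) : Int) *
        (ps.count (PySem.Int.mod p s + 2 * s) : Int) := by
    intro p hp
    have hpps : p ∈ ps := by
      rw [hC, PySem.Dict.keys_counter] at hp
      exact (PySem.Set.mem_ofList ps p).mp hp
    have hpL := hmem p hpps
    have hdec := pvDecomp s p hs hpL
    have hrb := pvResBounds s p hs
    set r := PySem.Int.mod p s with hr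
    obtain ⟨m0, m1, m2, m3, m4, _, _, _⟩ := pvClassMod s r hrb
    rcases hdec with h | h | h
    · rw [h, m1, m2]
    · rw [h,
          show r + s + s = r + 2 * s by ring,
          show r + s + 2 * s = r + 3 * s by ring,
          m2, m3]
      ring
    · rw [h,
          show r + 2 * s + s = r + 3 * s by ring,
          show r + 2 * s + 2 * s = r + 4 * s by ring,
          m3, m4]
      ring
  rw [List.map_congr_left hterm]
  -- pass to Finset sums over distinct positions / distinct residues
  have hKnd : C.keys.Nodup := by rw [hC, PySem.Dict.keys_counter]; exact PySem.Set.nodup_ofList ps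
  have hRnd : (PySem.Set.ofList (ps.map (fun p => PySem.Int.mod p s))).Nodup :=
    PySem.Set.nodup_ofList _
  have hKT : C.keys.toFinset = ps.toFinset := by
    rw [hC, PySem.Dict.keys_counter]
    ext x; simp [PySem.Set.mem_ofList]
  have hRT : (PySem.Set.ofList (ps.map (fun p => PySem.Int.mod p s))).toFinset
      = ps.toFinset.image (fun p => PySem.Int.mod p s) := by
    ext x
    simp only [List.mem_toFinset, Finset.mem_image, PySem.Set.mem_ofList, List.mem_map]
  rw [← List.sum_toFinset _ hKnd, ← List.sum_toFinset _ hRnd, hKT, hRT]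
  rw [Finset.sum_comp (fun r => (ps.count r : Int) * (ps.count (r + s) : Int) * (ps.count (r + 2 * s) : Int))
        (fun p => PySem.Int.mod p s)]
  rw [Finset.mul_sum]
  apply Finset.sum_congr rfl
  intro b hb
  obtain ⟨p0, hp0T, hfp0⟩ := Finset.mem_image.mp hb
  have hp0 : p0 ∈ ps := List.mem_toFinset.mp hp0T
  have hrb : (0 < s ∧ 0 ≤ b ∧ b < s) ∨ (s < 0 ∧ s < b ∧ b ≤ 0) := by
    have := pvResBounds s p0 hs
    rw [hfp0] at this
    exact this
  obtain ⟨_, _, _, _, _, n0, n1, n2⟩ := pvClassMod s b hrb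
  by_cases hg : (ps.count b : Int) * (ps.count (b + s) : Int) * (ps.count (b + 2 * s) : Int) = 0
  · rw [hg]; simp
  · have hne1 : (ps.count b : Int) ≠ 0 := fun h => hg (by rw [h]; ring)
    have hne2 : (ps.count (b + s) : Int) ≠ 0 := fun h => hg (by rw [h]; ring)
    have hne3 : (ps.count (b + 2 * s) : Int) ≠ 0 := fun h => hg (by rw [h]; ring)
    have hfilter : (ps.toFinset.filter (fun p => PySem.Int.mod p s = b))
        = ({b, b + s, b + 2 * s} : Finset Int) := by
      ext x
      simp only [Finset.mem_filter, List.mem_toFinset, Finset.mem_insert, Finset.mem_singleton]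
      constructor
      · rintro ⟨hx, hfx⟩
        rcases pvDecomp s x hs (hmem x hx) with h | h | h <;> rw [hfx] at h <;> omega
      · rintro (rfl | rfl | rfl)
        · exact ⟨hmemne _ hne1, n0⟩
        · exact ⟨hmemne _ hne2, n1⟩
        · exact ⟨hmemne _ hne3, n2⟩
    rw [hfilter]
    have hcard : ({b, b + s, b + 2 * s} : Finset Int).card = 3 := by
      rw [Finset.card_insert_of_notMem (by simp only [Finset.mem_insert, Finset.mem_singleton]; omega),
          Finset.card_insert_of_notMem (by simp only [Finset.mem_singleton]; omega),
          Finset.card_singleton]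
    rw [hcard]
    push_cast [nsmul_eq_mul]
    ring

-- exact division by 3
lemma pvDivCancel (x : Int) : PySem.Int.floordiv (3 * x) 3 = x := by
  rw [PySem.Int.floordiv_eq_ediv_of_pos (by norm_num)]
  exact Int.mul_ediv_cancel_left x (by norm_num)

-- ===== VERDICT (by name: the statement is the Claim_ definition above) =====
theorem count_equilateral_triangles_spec : Claim_equal_count_equilateral_triangles := by
  intro N L ds _ hpre
  unfold Spec_count_equilateral_triangles count_equilateral_triangles count_equilateral_triangles_alt
  split_ifs with h1 h2 h3
  · rfl
  · rfl
  · rfl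
  · push Not at h2
    have hL : L = 3 * PySem.Int.floordiv L 3 := by
      have := PySem.Int.floordiv_mul_add_mod L 3
      omega
    set s := PySem.Int.floordiv L 3 with hsd
    have hslice : PySem.List.slice ds none (some (N - 1)) = ds.take (N - 1).toNat :=
      PySem.List.slice_to ds (by omega)
    set ps : List Int := 0 :: pvPositions L 0 (ds.take (N - 1).toNat) with hps
    have hmem : ∀ p ∈ ps, PySem.Int.mod p L = p := by
      intro p hp
      rcases List.mem_cons.mp hp with rfl | hp'
      · have hb : (0 < L ∧ (0:Int) ≤ 0 ∧ (0:Int) < L) ∨ (L < 0 ∧ L < 0 ∧ (0:Int) ≤ 0) := by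
          rcases lt_or_gt_of_ne (show L ≠ 0 by omega) with h | h
          · exact Or.inr ⟨h, h, le_refl 0⟩
          · exact Or.inl ⟨h, le_refl 0, h⟩
        have := pvModEq L 0 0 hb
        simpa using this
      · exact pvPositions_mod L _ 0 p hp'
    have hBdict : pvLoopB L s (pvBump s PySem.Dict.empty 0) 0 (PySem.List.slice ds none (some (N - 1)))
        = ps.foldl (pvBump s) PySem.Dict.empty := by
      rw [hslice, pvLoopB_eq_foldl, hps, List.foldl_cons]
    rw [hBdict, pvAltVal L s h3 hL ps hmem, pvKey L s h3 hL ps hmem, pvDivCancel]
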